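-- pv_equiv track=rewrite | github.com/sheldon123z/EMOFM-Python-reproducing | simple_refpoint_adaption.py | dominated
-- ===== SOURCE A (Python) =====
-- import copy
--
-- def dominated(listOfElems,kkm_rc=False):
--     A = copy.deepcopy(listOfElems)
--     dominated = []
--     if kkm_rc:
--         for i in A:
--             for j in A:
--                 if i == j:
--                     continue
--                 if i[1]>j[1] and i[0]>j[0]:
--                     dominated.append(i)
--                     break
--     return dominated
-- ===== SOURCE B (Python) =====
-- def dominated(listOfElems, kkm_rc=False):
--     if not kkm_rc:
--         return []
--     # min y per distinct x
--     miny = {}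
--     for e in listOfElems:
--         x, y = e[0], e[1]
--         if x not in miny or y < miny[x]:
--             miny[x] = y
--     # thr[x] = min y among points with strictly smaller x (None if no such point)
--     thr = {}
--     best = None
--     for x in sorted(miny):
--         thr[x] = best
--         best = miny[x] if best is None else min(best, miny[x])
--     return [list(e) for e in listOfElems if thr[e[0]] is not None and thr[e[0]] < e[1]]
-- ===== Notes on version B (the rewrite author's own statement) =====
-- stated objective: alternative
-- what changed: A tests every point against every other point with a nested scan and break; B makes one pass recording the minimum y per distinct x, sorts the distinct xs once to build a prefix-minimum table of the least y over strictly smaller xs, and filters the list against that table (asymptotically better, but the timing runner could not measure A, so no speed is claimed).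
-- outside the precondition, e.g. on dominated([[1]], True): A returns [], B raises IndexError
import Mathlib
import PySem

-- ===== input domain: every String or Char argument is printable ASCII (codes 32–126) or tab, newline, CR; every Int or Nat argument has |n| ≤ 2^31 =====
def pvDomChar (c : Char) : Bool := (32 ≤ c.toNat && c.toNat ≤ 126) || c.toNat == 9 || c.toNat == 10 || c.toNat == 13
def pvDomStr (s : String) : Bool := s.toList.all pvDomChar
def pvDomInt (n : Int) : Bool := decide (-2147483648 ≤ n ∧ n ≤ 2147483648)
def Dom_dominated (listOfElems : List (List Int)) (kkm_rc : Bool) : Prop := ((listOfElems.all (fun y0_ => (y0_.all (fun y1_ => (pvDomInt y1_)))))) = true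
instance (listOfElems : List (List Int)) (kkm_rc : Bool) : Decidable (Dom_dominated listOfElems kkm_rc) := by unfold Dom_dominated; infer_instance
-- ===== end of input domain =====

-- B replaces A's all-pairs scan by per-x minimum ys, a prefix-minimum table over the sorted distinct xs, and a filter (objective: alternative algorithm; speed not measured here).


-- ===== PORT A =====
-- inner 'for j in A: … break' loop: true iff the break is reached
def dominatedInner (i : List Int) : List (List Int) → Bool
  | [] => false
  | j :: rest =>
    if i = j then dominatedInner i rest
    else if PySem.List.pyGetD i 1 0 > PySem.List.pyGetD j 1 0 ∧ PySem.List.pyGetD i 0 0 > PySem.List.pyGetD j 0 0 then true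
    else dominatedInner i rest

def dominated (listOfElems : List (List Int)) (kkm_rc : Bool) : List (List Int) :=
  if kkm_rc then
    listOfElems.foldl (fun acc i => if dominatedInner i listOfElems then acc ++ [i] else acc) []
  else []

-- ===== PORT B =====
-- 'b if o is None else min(o, b)' combining step, shared by both accumulating loops of Source B
def ominMin (o : Option Int) (y : Int) : Option Int :=
  match o with
  | none => some y
  | some b => some (min b y)

-- body of Source B's first loop: 'if x not in miny or y < miny[x]: miny[x] = y'
def altMinYStep (d : PySem.Dict Int Int) (e : List Int) : PySem.Dict Int Int :=
  if !(d.contains (PySem.List.pyGetD e 0 0)) || decide (PySem.List.pyGetD e 1 0 < d.getD (PySem.List.pyGetD e 0 0) 0)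
  then d.insert (PySem.List.pyGetD e 0 0) (PySem.List.pyGetD e 1 0)
  else d

def altMinY (l : List (List Int)) : PySem.Dict Int Int :=
  l.foldl altMinYStep PySem.Dict.empty

-- body of Source B's second loop: 'thr[x] = best; best = miny[x] if best is None else min(best, miny[x])'
def altThrStep (miny : PySem.Dict Int Int) (s : PySem.Dict Int (Option Int) × Option Int) (x : Int) :
    PySem.Dict Int (Option Int) × Option Int :=
  (s.1.insert x s.2, ominMin s.2 (miny.getD x 0))

def dominated_alt (listOfElems : List (List Int)) (kkm_rc : Bool) : List (List Int) :=
  if kkm_rc then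
    let miny := altMinY listOfElems
    let ks := PySem.List.sorted miny.keys (fun x => x) false
    let thr := (ks.foldl (altThrStep miny) (PySem.Dict.empty, none)).1
    listOfElems.filter (fun e =>
      match thr.getD (PySem.List.pyGetD e 0 0) none with
      | none => false
      | some b => decide (b < PySem.List.pyGetD e 1 0))
  else []

-- ===== PRECONDITION & SPEC =====
-- Pre_ excludes (when kkm_rc is true) lists containing an element of length < 2: on those Python A raises
-- IndexError as soon as two distinct elements are compared, and only accidentally returns an empty result when no two
-- elements differ; B accesses e[0], e[1] of every element and raises IndexError there.
def Pre_dominated (listOfElems : List (List Int)) (kkm_rc : Bool) : Prop :=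
  kkm_rc = true → ∀ e ∈ listOfElems, 2 ≤ e.length
instance (listOfElems : List (List Int)) (kkm_rc : Bool) : Decidable (Pre_dominated listOfElems kkm_rc) := by
  unfold Pre_dominated; infer_instance
def pvWitness_dominated : List (List Int) × Bool := ([[1, 2], [0, 0], [3, 3], [0, 5]], true)

def Spec_dominated (listOfElems : List (List Int)) (kkm_rc : Bool) (out : List (List Int)) : Prop := out = dominated_alt listOfElems kkm_rc
instance (listOfElems : List (List Int)) (kkm_rc : Bool) (out : List (List Int)) : Decidable (Spec_dominated listOfElems kkm_rc out) := by unfold Spec_dominated; infer_instance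

-- ===== CLAIM (what is proved, stated in full; the proofs are below) =====
def Claim_equal_dominated : Prop := ∀ (listOfElems : List (List Int)) (kkm_rc : Bool), Dom_dominated listOfElems kkm_rc → Pre_dominated listOfElems kkm_rc → Spec_dominated listOfElems kkm_rc (dominated listOfElems kkm_rc)

-- ===== LEMMAS AND PROOFS =====

-- coordinates as A and B read them
def xc (e : List Int) : Int := PySem.List.pyGetD e 0 0
def yc (e : List Int) : Int := PySem.List.pyGetD e 1 0

-- 'the option holds a value below c'
def isBelow (o : Option Int) (c : Int) : Prop := ∃ b, o = some b ∧ b < c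

lemma inner_iff (i : List Int) (l : List (List Int)) :
    dominatedInner i l = true ↔ ∃ j ∈ l, yc j < yc i ∧ xc j < xc i := by
  induction l with
  | nil => simp [dominatedInner]
  | cons j rest ih =>
    simp only [dominatedInner]
    by_cases hij : i = j
    · subst hij
      rw [if_pos rfl, ih]
      simp only [List.mem_cons]
      constructor
      · rintro ⟨k, hk, h⟩; exact ⟨k, Or.inr hk, h⟩
      · rintro ⟨k, rfl | hk, h⟩
        · unfold yc at h; omega
        · exact ⟨k, hk, h⟩
    · rw [if_neg hij]
      split_ifs with h
      · simp only [true_iff]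
        exact ⟨j, List.mem_cons_self, by unfold xc yc; omega⟩
      · rw [ih]
        simp only [List.mem_cons]
        constructor
        · rintro ⟨k, hk, hc⟩; exact ⟨k, Or.inr hk, hc⟩
        · rintro ⟨k, rfl | hk, hc⟩
          · exact absurd (by unfold xc yc at hc; omega : PySem.List.pyGetD i 1 0 > PySem.List.pyGetD k 1 0 ∧ PySem.List.pyGetD i 0 0 > PySem.List.pyGetD k 0 0) h
          · exact ⟨k, hk, hc⟩

lemma A_filter (l : List (List Int)) :
    dominated l true = l.filter (fun i => dominatedInner i l) := by
  unfold dominated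
  rw [if_pos rfl]
  exact PySem.List.foldl_append_if_eq_filter (fun i => dominatedInner i l) l []

lemma ominMin_isSome (ys : List Int) (a : Int) : ∃ b, ys.foldl ominMin (some a) = some b := by
  induction ys generalizing a with
  | nil => exact ⟨a, rfl⟩
  | cons y rest ih => simpa [ominMin] using ih (min a y)

lemma fold_ominMin_none_iff (ys : List Int) (o : Option Int) :
    ys.foldl ominMin o = none ↔ o = none ∧ ys = [] := by
  cases ys with
  | nil => simp
  | cons y rest =>
    simp only [List.foldl_cons]
    have hns : ∀ a, rest.foldl ominMin (some a) ≠ none := by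
      intro a h
      obtain ⟨b, hb⟩ := ominMin_isSome rest a
      rw [hb] at h
      simp at h
    cases o <;> simp [ominMin, hns]

lemma isBelow_fold (ys : List Int) (o : Option Int) (c : Int) :
    isBelow (ys.foldl ominMin o) c ↔ isBelow o c ∨ ∃ y ∈ ys, y < c := by
  induction ys generalizing o with
  | nil => simp
  | cons y rest ih =>
    simp only [List.foldl_cons, ih, List.mem_cons]
    have hstep : isBelow (ominMin o y) c ↔ isBelow o c ∨ y < c := by
      cases o with
      | none => simp [ominMin, isBelow]
      | some b =>
        show isBelow (some (min b y)) c ↔ isBelow (some b) c ∨ y < c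
        simp only [isBelow, Option.some.injEq]
        constructor
        · rintro ⟨b', hb', hlt⟩
          rw [← hb'] at hlt
          rcases min_choice b y with h | h <;> rw [h] at hlt
          · exact Or.inl ⟨b, rfl, hlt⟩
          · exact Or.inr hlt
        · rintro (⟨b', hb', hlt⟩ | h)
          · exact ⟨min b y, rfl, lt_of_le_of_lt (min_le_left b y) (by rw [hb']; exact hlt)⟩
          · exact ⟨min b y, rfl, lt_of_le_of_lt (min_le_right b y) h⟩
    rw [hstep]
    constructor
    · rintro (h | ⟨z, hz, hlt⟩)
      · rcases h with h | h
        · exact Or.inl h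
        · exact Or.inr ⟨y, Or.inl rfl, h⟩
      · exact Or.inr ⟨z, Or.inr hz, hlt⟩
    · rintro (h | ⟨z, hz, hlt⟩)
      · exact Or.inl (Or.inl h)
      · rcases hz with rfl | hz
        · exact Or.inl (Or.inr hlt)
        · exact Or.inr ⟨z, hz, hlt⟩

-- the first loop of B: lookups in the built dict are the running minimum of the matching ys
lemma minY_get? (l : List (List Int)) (d : PySem.Dict Int Int) (x : Int) :
    (l.foldl altMinYStep d).get? x
      = ((l.filter (fun e => decide (xc e = x))).map yc).foldl ominMin (d.get? x) := by
  induction l generalizing d with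
  | nil => rfl
  | cons e rest ih =>
    have hstep_self : (altMinYStep d e).get? (xc e) = ominMin (d.get? (xc e)) (yc e) := by
      unfold altMinYStep
      cases h : d.get? (xc e) with
      | none =>
        have hc : d.contains (PySem.List.pyGetD e 0 0) = false := by
          rw [PySem.Dict.contains_eq_isSome_get?]
          show ((d.get? (xc e)).isSome) = false
          rw [h]; rfl
        rw [if_pos (by simp [hc])]
        show (d.insert (xc e) (yc e)).get? (xc e) = ominMin none (yc e)
        rw [PySem.Dict.get?_insert_self]
        rfl
      | some m =>
        have hc : d.contains (PySem.List.pyGetD e 0 0) = true := by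
          rw [PySem.Dict.contains_eq_isSome_get?]
          show ((d.get? (xc e)).isSome) = true
          rw [h]; rfl
        have hg : d.getD (PySem.List.pyGetD e 0 0) 0 = m := by
          rw [PySem.Dict.getD_eq_get?_getD]
          show ((d.get? (xc e)).getD 0) = m
          rw [h]; rfl
        by_cases hlt : PySem.List.pyGetD e 1 0 < m
        · rw [if_pos (by simp [hg, hlt])]
          show (d.insert (xc e) (yc e)).get? (xc e) = ominMin (some m) (yc e)
          rw [PySem.Dict.get?_insert_self]
          show some (yc e) = some (min m (yc e))
          unfold yc
          rw [min_eq_right (le_of_lt hlt)]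
        · rw [if_neg (by simp [hc, hg, hlt])]
          rw [h]
          show some m = some (min m (yc e))
          unfold yc
          rw [min_eq_left (not_lt.mp hlt)]
    have hstep_ne : ∀ x', x' ≠ xc e → (altMinYStep d e).get? x' = d.get? x' := by
      intro x' hne
      unfold altMinYStep
      split_ifs with h
      · exact PySem.Dict.get?_insert_of_ne d _ hne
      · rfl
    rw [List.foldl_cons, ih]
    by_cases hx : xc e = x
    · subst hx
      rw [hstep_self]
      simp
    · rw [hstep_ne x (fun h => hx h.symm)]
      simp [hx]

lemma minY_keys_nodup (l : List (List Int)) (d : PySem.Dict Int Int) (h : d.keys.Nodup) :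
    (l.foldl altMinYStep d).keys.Nodup := by
  induction l generalizing d with
  | nil => exact h
  | cons e rest ih =>
    refine ih _ ?_
    unfold altMinYStep
    split_ifs with hc
    · exact PySem.Dict.nodup_keys_insert _ _ _ h
    · exact h

lemma mem_minY_keys (l : List (List Int)) (x : Int) :
    x ∈ (altMinY l).keys ↔ ∃ j ∈ l, xc j = x := by
  rw [← not_iff_not, ← PySem.Dict.get?_eq_none_iff_not_mem_keys]
  unfold altMinY
  rw [minY_get?, fold_ominMin_none_iff]
  simp [List.filter_eq_nil_iff]

-- the second loop of B: keys not yet processed are untouched …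
lemma thr_get?_notmem (miny : PySem.Dict Int Int) (ks : List Int)
    (d0 : PySem.Dict Int (Option Int)) (b0 : Option Int) (x : Int) (hx : x ∉ ks) :
    ((ks.foldl (altThrStep miny) (d0, b0)).1).get? x = d0.get? x := by
  induction ks generalizing d0 b0 with
  | nil => rfl
  | cons k rest ih =>
    rw [List.foldl_cons]
    have hne : x ≠ k := fun h => hx (h ▸ List.mem_cons_self)
    rw [show altThrStep miny (d0, b0) k = (d0.insert k b0, ominMin b0 (miny.getD k 0)) from rfl]
    rw [ih _ _ (fun h => hx (List.mem_cons_of_mem _ h))]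
    exact PySem.Dict.get?_insert_of_ne d0 _ hne

-- … and a processed key is mapped to the running minimum over the strictly smaller keys
lemma thr_get?_mem (miny : PySem.Dict Int Int) (ks : List Int)
    (d0 : PySem.Dict Int (Option Int)) (b0 : Option Int) (x : Int)
    (hp : ks.Pairwise (· < ·)) (hx : x ∈ ks) :
    ((ks.foldl (altThrStep miny) (d0, b0)).1).get? x
      = some (((ks.filter (fun k => decide (k < x))).map (fun k => miny.getD k 0)).foldl ominMin b0) := by
  induction ks generalizing d0 b0 with
  | nil => exact absurd hx (List.not_mem_nil)
  | cons k rest ih =>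
    rw [List.pairwise_cons] at hp
    rcases List.mem_cons.mp hx with rfl | hxr
    · have hnr : x ∉ rest := fun h => absurd (hp.1 x h) (lt_irrefl x)
      rw [List.foldl_cons,
        show altThrStep miny (d0, b0) x = (d0.insert x b0, ominMin b0 (miny.getD x 0)) from rfl,
        thr_get?_notmem _ _ _ _ _ hnr, PySem.Dict.get?_insert_self]
      have hfr : rest.filter (fun k => decide (k < x)) = [] := by
        rw [List.filter_eq_nil_iff]
        intro k hk
        simp only [decide_eq_true_eq, not_lt]
        exact (hp.1 k hk).le
      simp [hfr]
    · have hk : k < x := hp.1 x hxr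
      rw [List.foldl_cons,
        show altThrStep miny (d0, b0) k = (d0.insert k b0, ominMin b0 (miny.getD k 0)) from rfl,
        ih _ _ hp.2 hxr]
      simp [hk]

lemma B_cond_iff (l : List (List Int)) (e : List Int) (he : e ∈ l) :
    ((match ((PySem.List.sorted (altMinY l).keys (fun x => x) false).foldl
          (altThrStep (altMinY l)) (PySem.Dict.empty, none)).1.getD (PySem.List.pyGetD e 0 0) none with
       | none => false
       | some b => decide (b < PySem.List.pyGetD e 1 0)) = true)
      ↔ ∃ j ∈ l, yc j < yc e ∧ xc j < xc e := by
  set miny := altMinY l with hminy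
  set ks := PySem.List.sorted miny.keys (fun x => x) false with hks
  have hperm : ks.Perm miny.keys := PySem.List.sorted_perm _ _ _
  have hnodup : ks.Nodup := hperm.nodup_iff.mpr (minY_keys_nodup l PySem.Dict.empty PySem.Dict.nodup_keys_empty)
  have hpw : ks.Pairwise (· < ·) := by
    have hle : ks.Pairwise (fun a b => a ≤ b) := PySem.List.sorted_pairwise miny.keys (fun x => x)
    exact (hle.and hnodup).imp (fun {a b} h => lt_of_le_of_ne h.1 h.2)
  have hmemks : ∀ x, x ∈ ks ↔ ∃ j ∈ l, xc j = x := by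
    intro x
    rw [hperm.mem_iff, hminy, mem_minY_keys]
  have hxe : xc e ∈ ks := (hmemks (xc e)).mpr ⟨e, he, rfl⟩
  have hthr := thr_get?_mem miny ks PySem.Dict.empty none (xc e) hpw hxe
  have hgetD : ((ks.foldl (altThrStep miny) (PySem.Dict.empty, none)).1).getD (xc e) none
      = (((ks.filter (fun k => decide (k < xc e))).map (fun k => miny.getD k 0)).foldl ominMin none) := by
    rw [PySem.Dict.getD_eq_get?_getD, hthr]
    rfl
  -- per-key characterization of the stored minimum
  have hmv : ∀ k ∈ ks, ∀ c : Int, (miny.getD k 0 < c) ↔ ∃ j ∈ l, xc j = k ∧ yc j < c := by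
    intro k hk c
    have hne : miny.get? k ≠ none := by
      intro hcon
      exact (PySem.Dict.get?_eq_none_iff_not_mem_keys miny k).mp hcon (hperm.mem_iff.mp hk)
    obtain ⟨m, hm⟩ := Option.ne_none_iff_exists'.mp hne
    have hgd : miny.getD k 0 = m := by
      rw [PySem.Dict.getD_eq_get?_getD, hm]; rfl
    have hbel : isBelow (miny.get? k) c ↔ ∃ j ∈ l, xc j = k ∧ yc j < c := by
      rw [hminy]
      show isBelow ((altMinY l).get? k) c ↔ _
      unfold altMinY
      rw [minY_get?, isBelow_fold]
      simp only [PySem.Dict.get?_empty, isBelow, List.mem_map, List.mem_filter, decide_eq_true_eq]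
      constructor
      · rintro (⟨b, hb, _⟩ | ⟨y, ⟨j, ⟨hj, hx⟩, rfl⟩, hlt⟩)
        · exact absurd hb (by simp)
        · exact ⟨j, hj, hx, hlt⟩
      · rintro ⟨j, hj, hx, hlt⟩
        exact Or.inr ⟨yc j, ⟨j, ⟨hj, hx⟩, rfl⟩, hlt⟩
    rw [hm] at hbel
    simp only [isBelow, Option.some.injEq] at hbel
    rw [hgd]
    constructor
    · intro h
      exact hbel.mp ⟨m, rfl, h⟩
    · intro h
      rcases hbel.mpr h with ⟨b, hb, hlt⟩
      rw [hb]; exact hlt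
  have hxc : PySem.List.pyGetD e 0 0 = xc e := rfl
  have hyc : PySem.List.pyGetD e 1 0 = yc e := rfl
  have hmatch : ∀ (o : Option Int) (c : Int),
      ((match o with | none => false | some b => decide (b < c)) = true) ↔ isBelow o c := by
    intro o c
    cases o <;> simp [isBelow]
  rw [hxc, hyc, hgetD, hmatch, isBelow_fold]
  simp only [List.mem_map, List.mem_filter, decide_eq_true_eq]
  constructor
  · rintro (⟨b, hb, _⟩ | ⟨v, ⟨k, ⟨hk, hklt⟩, rfl⟩, hvlt⟩)
    · exact absurd hb (by simp)
    · rcases (hmv k hk (yc e)).mp hvlt with ⟨j, hj, hx, hy⟩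
      exact ⟨j, hj, hy, hx ▸ hklt⟩
  · rintro ⟨j, hj, hy, hx⟩
    have hkin : xc j ∈ ks := (hmemks (xc j)).mpr ⟨j, hj, rfl⟩
    exact Or.inr ⟨miny.getD (xc j) 0, ⟨xc j, ⟨hkin, hx⟩, rfl⟩,
      (hmv (xc j) hkin (yc e)).mpr ⟨j, hj, rfl, hy⟩⟩

-- ===== VERDICT (by name: the statement is the Claim_ definition above) =====
theorem dominated_spec : Claim_equal_dominated := by
  intro l kkm _ _
  unfold Spec_dominated
  cases kkm with
  | false => rfl
  | true =>
    rw [A_filter]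
    unfold dominated_alt
    rw [if_pos rfl]
    apply List.filter_congr
    intro e he
    rw [Bool.eq_iff_iff, inner_iff]
    exact (B_cond_iff l e he).symm
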